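-- pv_equiv track=rewrite | github.com/getrod/motif_typing | keyboard.py | interval_check
-- ===== SOURCE A (Python) =====
-- def interval_check(keyboard_intervals: list[int], motif_interals: list[int]):
--     # find first interval
--     first_interval = motif_interals[0]
--
--     def find_starting_index(offset):
--         start_idx = -1
--         for i in range(offset, len(keyboard_intervals)):
--             if keyboard_intervals[i] == first_interval:
--                 start_idx = i
--                 break
--         return start_idx
--
--     start_idx = find_starting_index(0)
--
--     if start_idx == -1:
--         return False
--
--
--     while True:
--         failed = False
--
--         # check motif intervals
--         for i in range(len(motif_interals)):
--             keyboard_idx = i + start_idx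
--
--             # if end of keyboard_intervals is reached before end of motif_interals
--             # return false
--             if keyboard_idx >= len(keyboard_intervals):
--                 return False
--
--             # if interval order doesn't match, return false
--             if motif_interals[i] != keyboard_intervals[keyboard_idx]:
--                 failed = True
--
--         if failed:
--             # try another starting index
--             start_idx = find_starting_index(start_idx + 1)
--             if start_idx == -1: return False
--
--         else: return True
-- ===== SOURCE B (Python) =====
-- def interval_check(keyboard_intervals: list[int], motif_interals: list[int]):
--     m = len(motif_interals)
--     return any(keyboard_intervals[i:i + m] == motif_interals
--                for i in range(len(keyboard_intervals) - m + 1))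
-- ===== Notes on version B (the rewrite author's own statement) =====
-- stated objective: simpler
-- what changed: A searches for positions of the motif's first interval and re-verifies the whole motif at each such position in an outer retry loop; B is a one-line sliding-window check that compares each slice keyboard[i:i+m] against the motif directly.
import Mathlib
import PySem

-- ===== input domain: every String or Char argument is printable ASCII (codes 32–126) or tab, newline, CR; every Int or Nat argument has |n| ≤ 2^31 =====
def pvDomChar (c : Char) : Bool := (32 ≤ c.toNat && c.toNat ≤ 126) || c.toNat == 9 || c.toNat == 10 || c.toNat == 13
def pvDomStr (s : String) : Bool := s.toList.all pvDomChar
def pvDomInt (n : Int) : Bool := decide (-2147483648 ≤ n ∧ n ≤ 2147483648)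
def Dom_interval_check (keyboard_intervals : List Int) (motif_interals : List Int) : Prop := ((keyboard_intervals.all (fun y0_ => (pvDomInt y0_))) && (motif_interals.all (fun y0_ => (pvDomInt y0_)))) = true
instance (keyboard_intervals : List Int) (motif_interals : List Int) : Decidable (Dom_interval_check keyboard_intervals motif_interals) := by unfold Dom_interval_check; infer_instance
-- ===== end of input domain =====

-- B replaces A's find-first-interval-then-reverify retry loop by a direct sliding-window
-- comparison of each window keyboard[i:i+m] against the motif (objective: simpler).

-- ===== PORT A =====
-- the inner 'for i in range(offset, len(keyboard_intervals)): if keyboard_intervals[i] == first: break' loop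
def pvFindLoop (k : List Int) (first : Int) : List Int → Int
  | [] => -1
  | i :: rest => if PySem.List.pyGetD k i 0 == first then i else pvFindLoop k first rest

-- termination helper for pvWhile (cited in decreasing_by)
lemma pvFindLoop_mem (k : List Int) (first : Int) (l : List Int) :
    pvFindLoop k first l = -1 ∨ pvFindLoop k first l ∈ l := by
  induction l with
  | nil => exact Or.inl rfl
  | cons i rest ih =>
    by_cases h : PySem.List.pyGetD k i 0 == first
    · simp [pvFindLoop, h]
    · simp only [pvFindLoop, h]
      rcases ih with h1 | h1
      · exact Or.inl (by simp [h1])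
      · exact Or.inr (by simp [h1])

-- def find_starting_index(offset)
def pvFindStart (k : List Int) (first : Int) (offset : Int) : Int :=
  pvFindLoop k first (PySem.List.pyRange offset (k.length : Int) 1)

lemma pvFindStart_mem_bounds (k : List Int) (first offset : Int)
    (h : ¬ pvFindStart k first offset = -1) :
    offset ≤ pvFindStart k first offset ∧ pvFindStart k first offset < (k.length : Int) := by
  rcases pvFindLoop_mem k first (PySem.List.pyRange offset (k.length : Int) 1) with h1 | h1
  · exact absurd h1 h
  · exact (PySem.List.mem_pyRange_one).mp h1

-- the 'for i in range(len(motif_interals))' body: none = the early 'return False', some failed otherwise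
def pvCheck (k m : List Int) (start : Int) : List Int → Bool → Option Bool
  | [], failed => some failed
  | i :: rest, failed =>
    if (k.length : Int) ≤ i + start then none
    else pvCheck k m start rest
      (failed || !(PySem.List.pyGetD m i 0 == PySem.List.pyGetD k (i + start) 0))

-- the 'while True' loop of A
def pvWhile (k m : List Int) (start : Int) : Bool :=
  match pvCheck k m start (PySem.List.pyRange 0 (m.length : Int) 1) false with
  | none => false
  | some false => true
  | some true =>
    if h : pvFindStart k (PySem.List.pyGetD m 0 0) (start + 1) = -1 then false
    else pvWhile k m (pvFindStart k (PySem.List.pyGetD m 0 0) (start + 1))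
termination_by ((k.length : Int) - start).toNat
decreasing_by
  have hb := pvFindStart_mem_bounds k (PySem.List.pyGetD m 0 0) (start + 1) h
  omega

-- motif_interals[0] is pyGetD with a junk default: Pre_ excludes [], where Python raises IndexError
def interval_check (keyboard_intervals : List Int) (motif_interals : List Int) : Bool :=
  if pvFindStart keyboard_intervals (PySem.List.pyGetD motif_interals 0 0) 0 = -1 then false
  else pvWhile keyboard_intervals motif_interals
    (pvFindStart keyboard_intervals (PySem.List.pyGetD motif_interals 0 0) 0)

-- ===== PORT B =====
def interval_check_alt (keyboard_intervals : List Int) (motif_interals : List Int) : Bool :=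
  (PySem.List.pyRange 0 ((keyboard_intervals.length : Int) - (motif_interals.length : Int) + 1) 1).any
    (fun i => PySem.List.slice keyboard_intervals (some i)
        (some (i + (motif_interals.length : Int))) == motif_interals)

-- ===== PRECONDITION & SPEC =====
-- Pre_ excludes only the empty motif list, on which A raises IndexError (motif_interals[0])
def Pre_interval_check (keyboard_intervals : List Int) (motif_interals : List Int) : Prop :=
  motif_interals ≠ []
instance (keyboard_intervals : List Int) (motif_interals : List Int) : Decidable (Pre_interval_check keyboard_intervals motif_interals) := by unfold Pre_interval_check; infer_instance

def pvWitness_interval_check : List Int × List Int := ([1, 2], [2])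

def Spec_interval_check (keyboard_intervals : List Int) (motif_interals : List Int) (out : Bool) : Prop := out = interval_check_alt keyboard_intervals motif_interals
instance (keyboard_intervals : List Int) (motif_interals : List Int) (out : Bool) : Decidable (Spec_interval_check keyboard_intervals motif_interals out) := by unfold Spec_interval_check; infer_instance

-- ===== CLAIM (what is proved, stated in full; the proofs are below) =====
def Claim_equal_interval_check : Prop := ∀ (keyboard_intervals : List Int) (motif_interals : List Int), Dom_interval_check keyboard_intervals motif_interals → Pre_interval_check keyboard_intervals motif_interals → Spec_interval_check keyboard_intervals motif_interals (interval_check keyboard_intervals motif_interals)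


-- ===== LEMMAS AND PROOFS =====

-- 'the motif occurs at position i'
def pvOcc (k m : List Int) (i : Nat) : Prop := (k.drop i).take m.length = m

lemma pvOcc_len {k m : List Int} {i : Nat} (hm : m ≠ []) (h : pvOcc k m i) :
    i + m.length ≤ k.length := by
  have h2 := congrArg List.length h
  have h3 : m.length ≠ 0 := by simpa using hm
  simp at h2
  omega

lemma pvOcc_first {k m : List Int} {i : Nat} (hm : m ≠ []) (h : pvOcc k m i) :
    PySem.List.pyGetD k (i : Int) 0 = PySem.List.pyGetD m 0 0 := by
  have hlen := pvOcc_len hm h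
  have h' : (k.drop i).take m.length = m := h
  have hL : 0 < m.length := by
    have : m.length ≠ 0 := by simpa using hm
    omega
  have hin : i < k.length := by omega
  have h0 : k[i] = m[0] := by
    have h1 : ((k.drop i).take m.length)[0]'(by simp; omega) = m[0]'hL := by
      simp only [h']
    rw [List.getElem_take, List.getElem_drop] at h1
    simpa using h1
  rw [PySem.List.pyGetD_ofNat k i 0 hin, h0]
  have h2 := PySem.List.pyGetD_ofNat m 0 0 hL
  simpa using h2.symm

lemma pvCheck_some (k m : List Int) (s : Int) (h0 : 0 ≤ s)
    (hfit : s + (m.length : Int) ≤ (k.length : Int)) :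
    ∀ (j : Nat) (acc : Bool), j ≤ m.length →
      pvCheck k m s (PySem.List.pyRange (j : Int) (m.length : Int) 1) acc
        = some (acc || !((k.drop (s.toNat + j)).take (m.length - j) == m.drop j)) := by
  suffices H : ∀ (d j : Nat) (acc : Bool), m.length - j = d → j ≤ m.length →
      pvCheck k m s (PySem.List.pyRange (j : Int) (m.length : Int) 1) acc
        = some (acc || !((k.drop (s.toNat + j)).take (m.length - j) == m.drop j)) by
    intro j acc hj; exact H (m.length - j) j acc rfl hj
  intro d
  induction d with
  | zero =>
    intro j acc hd hj
    have hj' : j = m.length := by omega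
    subst hj'
    rw [PySem.List.pyRange_one_eq_nil (by omega)]
    simp [pvCheck]
  | succ d ih =>
    intro j acc hd hj
    have hjlt : j < m.length := by omega
    rw [PySem.List.pyRange_one_cons (by exact_mod_cast hjlt)]
    have hk : s.toNat + j < k.length := by omega
    have e1 : PySem.List.pyGetD m (j : Int) 0 = m[j] := PySem.List.pyGetD_ofNat m j 0 hjlt
    have e2 : PySem.List.pyGetD k ((j : Int) + s) 0 = k[s.toNat + j] := by
      have hcast : (j : Int) + s = ((s.toNat + j : Nat) : Int) := by omega
      rw [hcast]; exact PySem.List.pyGetD_ofNat k _ 0 hk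
    have hstep : pvCheck k m s ((j : Int) :: PySem.List.pyRange ((j : Int) + 1) (m.length : Int) 1) acc
        = pvCheck k m s (PySem.List.pyRange ((j : Int) + 1) (m.length : Int) 1)
            (acc || !(PySem.List.pyGetD m (j : Int) 0 == PySem.List.pyGetD k ((j : Int) + s) 0)) := by
      simp only [pvCheck]
      rw [if_neg (by omega)]
    rw [hstep]
    have hcast1 : (j : Int) + 1 = ((j + 1 : Nat) : Int) := by omega
    rw [hcast1, ih (j + 1) _ (by omega) (by omega)]
    have hw : (k.drop (s.toNat + j)).take (m.length - j)
        = k[s.toNat + j] :: (k.drop (s.toNat + (j + 1))).take (m.length - (j + 1)) := by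
      rw [List.drop_eq_getElem_cons hk]
      have hmm : m.length - j = (m.length - (j + 1)) + 1 := by omega
      rw [hmm, List.take_succ_cons, Nat.add_assoc]
    have hm2 : m.drop j = m[j] :: m.drop (j + 1) := List.drop_eq_getElem_cons hjlt
    rw [e1, e2, hw, hm2, List.cons_beq_cons]
    have hcomm : (m[j] == k[s.toNat + j]) = (k[s.toNat + j] == m[j]) := by
      rw [Bool.eq_iff_iff]
      constructor <;> (intro hx; exact beq_iff_eq.mpr (beq_iff_eq.mp hx).symm)
    rw [hcomm]
    cases (k[s.toNat + j] == m[j]) <;>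
      cases ((k.drop (s.toNat + (j + 1))).take (m.length - (j + 1)) == m.drop (j + 1)) <;>
      cases acc <;> simp

lemma pvCheck_none (k m : List Int) (s : Int) (h0 : 0 ≤ s)
    (hover : (k.length : Int) < s + (m.length : Int)) :
    ∀ (j : Nat) (acc : Bool), s + (j : Int) ≤ (k.length : Int) → j ≤ m.length →
      pvCheck k m s (PySem.List.pyRange (j : Int) (m.length : Int) 1) acc = none := by
  suffices H : ∀ (d j : Nat) (acc : Bool), m.length - j = d → s + (j : Int) ≤ (k.length : Int) →
      j ≤ m.length → pvCheck k m s (PySem.List.pyRange (j : Int) (m.length : Int) 1) acc = none by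
    intro j acc h1 h2; exact H (m.length - j) j acc rfl h1 h2
  intro d
  induction d with
  | zero =>
    intro j acc hd hle hj
    exact absurd hle (by omega)
  | succ d ih =>
    intro j acc hd hle hj
    have hjlt : j < m.length := by omega
    rw [PySem.List.pyRange_one_cons (by exact_mod_cast hjlt)]
    simp only [pvCheck]
    by_cases hc : (k.length : Int) ≤ (j : Int) + s
    · rw [if_pos hc]
    · rw [if_neg hc]
      have hcast1 : (j : Int) + 1 = ((j + 1 : Nat) : Int) := by omega
      rw [hcast1]
      exact ih (j + 1) _ (by omega) (by omega) (by omega)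

lemma pvFindLoop_cons_pos (k : List Int) (f a : Int) (l : List Int)
    (h : PySem.List.pyGetD k a 0 = f) : pvFindLoop k f (a :: l) = a := by
  simp [pvFindLoop, h]

lemma pvFindLoop_cons_neg (k : List Int) (f a : Int) (l : List Int)
    (h : PySem.List.pyGetD k a 0 ≠ f) : pvFindLoop k f (a :: l) = pvFindLoop k f l := by
  simp [pvFindLoop, h]

lemma pvFindLoop_range_neg (k : List Int) (f : Int) :
    ∀ (d : Nat) (a b : Int), 0 ≤ a → (b - a).toNat = d →
      (pvFindLoop k f (PySem.List.pyRange a b 1) = -1 ↔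
        ∀ i : Int, a ≤ i → i < b → PySem.List.pyGetD k i 0 ≠ f) := by
  intro d
  induction d with
  | zero =>
    intro a b ha hd
    rw [PySem.List.pyRange_one_eq_nil (by omega)]
    constructor
    · intro _ i h1 h2; exact absurd h2 (by omega)
    · intro _; rfl
  | succ d ih =>
    intro a b ha hd
    have hab : a < b := by omega
    rw [PySem.List.pyRange_one_cons hab]
    by_cases hc : PySem.List.pyGetD k a 0 = f
    · rw [pvFindLoop_cons_pos k f a _ hc]
      constructor
      · intro h; exact absurd h (by omega)
      · intro h; exact absurd hc (h a le_rfl hab)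
    · rw [pvFindLoop_cons_neg k f a _ hc]
      rw [ih (a + 1) b (by omega) (by omega)]
      constructor
      · intro h i h1 h2
        rcases eq_or_lt_of_le h1 with h3 | h3
        · subst h3; exact hc
        · exact h i (by omega) h2
      · intro h i h1 h2; exact h i (by omega) h2

lemma pvFindLoop_range_pos (k : List Int) (f : Int) :
    ∀ (d : Nat) (a b : Int), 0 ≤ a → (b - a).toNat = d →
      pvFindLoop k f (PySem.List.pyRange a b 1) ≠ -1 →
      a ≤ pvFindLoop k f (PySem.List.pyRange a b 1) ∧
      pvFindLoop k f (PySem.List.pyRange a b 1) < b ∧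
      PySem.List.pyGetD k (pvFindLoop k f (PySem.List.pyRange a b 1)) 0 = f ∧
      ∀ i : Int, a ≤ i → i < pvFindLoop k f (PySem.List.pyRange a b 1) →
        PySem.List.pyGetD k i 0 ≠ f := by
  intro d
  induction d with
  | zero =>
    intro a b ha hd hne
    rw [PySem.List.pyRange_one_eq_nil (by omega)] at hne
    exact absurd rfl hne
  | succ d ih =>
    intro a b ha hd hne
    have hab : a < b := by omega
    rw [PySem.List.pyRange_one_cons hab] at hne ⊢
    by_cases hc : PySem.List.pyGetD k a 0 = f
    · rw [pvFindLoop_cons_pos k f a _ hc]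
      exact ⟨le_rfl, hab, hc, fun i h1 h2 => absurd h2 (by omega)⟩
    · rw [pvFindLoop_cons_neg k f a _ hc] at hne ⊢
      obtain ⟨g1, g2, g3, g4⟩ := ih (a + 1) b (by omega) (by omega) hne
      exact ⟨by omega, g2, g3, fun i h1 h2 => by
        rcases eq_or_lt_of_le h1 with h3 | h3
        · subst h3; exact hc
        · exact g4 i (by omega) h2⟩

lemma pvFindStart_neg (k : List Int) (f off : Int) (h0 : 0 ≤ off)
    (h : pvFindStart k f off = -1) :
    ∀ i : Int, off ≤ i → i < (k.length : Int) → PySem.List.pyGetD k i 0 ≠ f :=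
  (pvFindLoop_range_neg k f (((k.length : Int) - off).toNat) off (k.length : Int) h0 rfl).mp h

lemma pvFindStart_pos (k : List Int) (f off : Int) (h0 : 0 ≤ off)
    (h : pvFindStart k f off ≠ -1) :
    off ≤ pvFindStart k f off ∧ pvFindStart k f off < (k.length : Int) ∧
    PySem.List.pyGetD k (pvFindStart k f off) 0 = f ∧
    ∀ i : Int, off ≤ i → i < pvFindStart k f off → PySem.List.pyGetD k i 0 ≠ f :=
  pvFindLoop_range_pos k f (((k.length : Int) - off).toNat) off (k.length : Int) h0 rfl h

lemma pvAlt_iff (k m : List Int) :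
    interval_check_alt k m = true ↔ ∃ i : Nat, pvOcc k m i := by
  unfold interval_check_alt
  rw [List.any_eq_true]
  constructor
  · rintro ⟨x, hx, hsl⟩
    rw [PySem.List.mem_pyRange_one] at hx
    obtain ⟨hx0, hx1⟩ := hx
    refine ⟨x.toNat, ?_⟩
    rw [PySem.List.slice_toNat k hx0 (by omega)] at hsl
    have he : ((x + (m.length : Int)).toNat - x.toNat) = m.length := by omega
    rw [he] at hsl
    exact eq_of_beq hsl
  · rintro ⟨i, hi⟩
    by_cases hm : m = []
    · subst hm
      refine ⟨0, ?_, ?_⟩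
      · rw [PySem.List.mem_pyRange_one]
        constructor
        · exact le_rfl
        · simp
      · rw [PySem.List.slice_toNat k le_rfl (by simp)]
        simp
    · have hlen := pvOcc_len hm hi
      refine ⟨(i : Int), ?_, ?_⟩
      · rw [PySem.List.mem_pyRange_one]
        constructor
        · omega
        · omega
      · rw [PySem.List.slice_toNat k (by omega) (by omega)]
        have he : (((i : Int) + (m.length : Int)).toNat - (i : Int).toNat) = m.length := by omega
        rw [he]
        have he2 : ((i : Int)).toNat = i := by omega
        rw [he2]
        exact beq_iff_eq.mpr hi

lemma pvWhile_iff (k m : List Int) (hm : m ≠ []) :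
    ∀ (d : Nat) (start : Int), 0 ≤ start → start < (k.length : Int) →
      ((k.length : Int) - start).toNat ≤ d →
      (pvWhile k m start = true ↔ ∃ i : Nat, start.toNat ≤ i ∧ pvOcc k m i) := by
  intro d
  induction d with
  | zero => intro s h0 hlt hd; exact absurd hd (by omega)
  | succ d ih =>
    intro s h0 hlt hd
    have hL0 : m.length ≠ 0 := by simpa using hm
    rw [pvWhile]
    by_cases hfit : s + (m.length : Int) ≤ (k.length : Int)
    · have hc := pvCheck_some k m s h0 hfit 0 false (by omega)
      simp only [Nat.cast_zero, Nat.add_zero, Nat.sub_zero, List.drop_zero, Bool.false_or] at hc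
      rw [hc]
      rcases hv : ((k.drop s.toNat).take m.length == m) with _ | _
      · -- window mismatch: some true branch
        simp only [Bool.not_false]
        have hwne : (k.drop s.toNat).take m.length ≠ m := by
          intro he; rw [beq_iff_eq.mpr he] at hv; exact Bool.noConfusion hv
        by_cases hs' : pvFindStart k (PySem.List.pyGetD m 0 0) (s + 1) = -1
        · rw [dif_pos hs']
          apply iff_of_false (by simp)
          rintro ⟨i, hge, hocc⟩
          have hneg := pvFindStart_neg k (PySem.List.pyGetD m 0 0) (s + 1) (by omega) hs'
          have hlen := pvOcc_len hm hocc
          rcases Nat.eq_or_lt_of_le hge with h3 | h3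
          · exact hwne (by rw [h3]; exact hocc)
          · exact hneg (i : Int) (by omega) (by omega) (pvOcc_first hm hocc)
        · rw [dif_neg hs']
          obtain ⟨g1, g2, g3, g4⟩ := pvFindStart_pos k (PySem.List.pyGetD m 0 0) (s + 1) (by omega) hs'
          rw [ih (pvFindStart k (PySem.List.pyGetD m 0 0) (s + 1)) (by omega) g2 (by omega)]
          constructor
          · rintro ⟨i, hge, hocc⟩; exact ⟨i, by omega, hocc⟩
          · rintro ⟨i, hge, hocc⟩
            refine ⟨i, ?_, hocc⟩
            by_contra hlt2
            have hlt3 : i < (pvFindStart k (PySem.List.pyGetD m 0 0) (s + 1)).toNat := by omega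
            rcases Nat.eq_or_lt_of_le hge with h3 | h3
            · exact hwne (by rw [h3]; exact hocc)
            · exact g4 (i : Int) (by omega) (by omega) (pvOcc_first hm hocc)
      · -- window matches: some false branch, returns true
        simp only [Bool.not_true]
        apply iff_of_true
        · trivial
        · exact ⟨s.toNat, le_rfl, eq_of_beq hv⟩
    · -- motif runs past the end of the keyboard: early 'return False'
      have hc := pvCheck_none k m s h0 (by omega) 0 false (by omega) (by omega)
      simp only [Nat.cast_zero] at hc
      rw [hc]
      apply iff_of_false (by simp)
      rintro ⟨i, hge, hocc⟩
      have hlen := pvOcc_len hm hocc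
      omega

-- ===== VERDICT (by name: the statement is the Claim_ definition above) =====
theorem interval_check_spec : Claim_equal_interval_check := by
  intro k m _ hpre
  unfold Spec_interval_check interval_check
  have hL0 : m.length ≠ 0 := by simpa using hpre
  by_cases hs : pvFindStart k (PySem.List.pyGetD m 0 0) 0 = -1
  · rw [if_pos hs]
    cases hb : interval_check_alt k m with
    | false => rfl
    | true =>
      exfalso
      obtain ⟨i, hocc⟩ := (pvAlt_iff k m).mp hb
      have hlen := pvOcc_len hpre hocc
      exact pvFindStart_neg k _ 0 le_rfl hs (i : Int) (by omega) (by omega)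
        (pvOcc_first hpre hocc)
  · rw [if_neg hs]
    obtain ⟨g1, g2, g3, g4⟩ := pvFindStart_pos k (PySem.List.pyGetD m 0 0) 0 le_rfl hs
    have hW := pvWhile_iff k m hpre
      ((k.length : Int) - pvFindStart k (PySem.List.pyGetD m 0 0) 0).toNat
      (pvFindStart k (PySem.List.pyGetD m 0 0) 0) g1 g2 le_rfl
    have hA := pvAlt_iff k m
    have hiff : (∃ i : Nat, (pvFindStart k (PySem.List.pyGetD m 0 0) 0).toNat ≤ i ∧ pvOcc k m i)
        ↔ ∃ i : Nat, pvOcc k m i := by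
      constructor
      · rintro ⟨i, _, h⟩; exact ⟨i, h⟩
      · rintro ⟨i, h⟩
        refine ⟨i, ?_, h⟩
        by_contra hlt
        have hlen := pvOcc_len hpre h
        exact g4 (i : Int) (by omega) (by omega) (pvOcc_first hpre h)
    cases hb : interval_check_alt k m with
    | true => rw [hW.mpr (hiff.mpr (hA.mp hb))]
    | false =>
      cases hw : pvWhile k m (pvFindStart k (PySem.List.pyGetD m 0 0) 0) with
      | false => rfl
      | true =>
        exfalso
        have hcontr := hA.mpr (hiff.mp (hW.mp hw))
        rw [hb] at hcontr
        exact Bool.noConfusion hcontr
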